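-- pv_equiv track=rewrite | github.com/unknown-spec10/Agentic-Ai | src/core/tech_utils.py | _get_industry_skills_for_role
-- ===== SOURCE A (Python) =====
-- from typing import List, Dict, Any, Optional, Tuple, Union
--
-- BASE_SKILL_TAXONOMY = {
--     "Programming Languages": [
--         "Python", "JavaScript", "Java", "C++", "C#", "Go", "Rust",
--         "TypeScript", "PHP", "Ruby", "Swift", "Kotlin"
--     ],
--     "Web Frameworks": [
--         "React", "Angular", "Vue.js", "Django", "Flask", "Express",
--         "Spring Boot", "Laravel", "ASP.NET", "Ruby on Rails", "Next.js"
--     ],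
--     "Cloud & DevOps": [
--         "AWS", "Azure", "GCP", "Docker", "Kubernetes", "Terraform",
--         "Jenkins", "GitHub Actions", "CircleCI", "Ansible", "Puppet"
--     ],
--     "Database Technologies": [
--         "SQL", "MySQL", "PostgreSQL", "MongoDB", "Redis", "Elasticsearch",
--         "Cassandra", "DynamoDB", "SQLite", "Oracle", "Neo4j"
--     ],
--     "AI & Machine Learning": [
--         "TensorFlow", "PyTorch", "scikit-learn", "NLP", "Computer Vision",
--         "Machine Learning", "Deep Learning", "Data Science", "BERT", "Transformers"
--     ],
--     "Mobile Development": [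
--         "iOS", "Android", "React Native", "Flutter", "Xamarin",
--         "Swift", "Kotlin", "Objective-C", "Mobile UI"
--     ],
--     "Tools & Methodologies": [
--         "Git", "Agile", "Scrum", "JIRA", "CI/CD", "TDD",
--         "Microservices", "REST API", "GraphQL", "DevOps"
--     ]
-- }
--
-- def _get_industry_skills_for_role(role: str) -> List[str]:
--     """Get common skills for an industry based on the role."""
--     # Map roles to industries/categories from our base taxonomy
--     role_lower = role.lower()
--
--     # Simple mapping of roles to skill categories
--     if any(term in role_lower for term in ["frontend", "front-end", "front end", "ui", "ux", "web developer"]):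
--         return BASE_SKILL_TAXONOMY.get("Web Frameworks", [])
--
--     elif any(term in role_lower for term in ["backend", "back-end", "back end", "api", "server"]):
--         return BASE_SKILL_TAXONOMY.get("Programming Languages", [])
--
--     elif any(term in role_lower for term in ["devops", "sre", "reliability", "infrastructure"]):
--         return BASE_SKILL_TAXONOMY.get("Cloud & DevOps", [])
--
--     elif any(term in role_lower for term in ["data", "analyst", "analytics", "bi", "intelligence"]):
--         return BASE_SKILL_TAXONOMY.get("Database Technologies", [])
--
--     elif any(term in role_lower for term in ["ml", "ai", "machine learning", "data science", "scientist"]):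
--         return BASE_SKILL_TAXONOMY.get("AI & Machine Learning", [])
--
--     elif any(term in role_lower for term in ["mobile", "ios", "android", "app"]):
--         return BASE_SKILL_TAXONOMY.get("Mobile Development", [])
--
--     # Combine multiple categories for general roles
--     elif any(term in role_lower for term in ["full stack", "fullstack", "engineer", "developer"]):
--         skills = []
--         for category in ["Programming Languages", "Web Frameworks", "Database Technologies"]:
--             skills.extend(BASE_SKILL_TAXONOMY.get(category, []))
--         return sorted(list(set(skills)))
--
--     # Default: return a mix of skills from all categories
--     else:
--         all_skills = []
--         for category, category_skills in BASE_SKILL_TAXONOMY.items():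
--             all_skills.extend(category_skills[:3])  # Take top 3 from each category
--         return sorted(list(set(all_skills)))
-- ===== SOURCE B (Python) =====
-- BASE_SKILL_TAXONOMY = {
--     "Programming Languages": [
--         "Python", "JavaScript", "Java", "C++", "C#", "Go", "Rust",
--         "TypeScript", "PHP", "Ruby", "Swift", "Kotlin"
--     ],
--     "Web Frameworks": [
--         "React", "Angular", "Vue.js", "Django", "Flask", "Express",
--         "Spring Boot", "Laravel", "ASP.NET", "Ruby on Rails", "Next.js"
--     ],
--     "Cloud & DevOps": [
--         "AWS", "Azure", "GCP", "Docker", "Kubernetes", "Terraform",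
--         "Jenkins", "GitHub Actions", "CircleCI", "Ansible", "Puppet"
--     ],
--     "Database Technologies": [
--         "SQL", "MySQL", "PostgreSQL", "MongoDB", "Redis", "Elasticsearch",
--         "Cassandra", "DynamoDB", "SQLite", "Oracle", "Neo4j"
--     ],
--     "AI & Machine Learning": [
--         "TensorFlow", "PyTorch", "scikit-learn", "NLP", "Computer Vision",
--         "Machine Learning", "Deep Learning", "Data Science", "BERT", "Transformers"
--     ],
--     "Mobile Development": [
--         "iOS", "Android", "React Native", "Flutter", "Xamarin",
--         "Swift", "Kotlin", "Objective-C", "Mobile UI"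
--     ],
--     "Tools & Methodologies": [
--         "Git", "Agile", "Scrum", "JIRA", "CI/CD", "TDD",
--         "Microservices", "REST API", "GraphQL", "DevOps"
--     ]
-- }
--
-- # Keyword -> priority (rule rank) hash index, built once.  Inverted traversal:
-- # instead of scanning the role for each keyword, we enumerate the substrings of
-- # the role and look each one up in this dict, keeping the smallest rank found.
-- _TERM_RANK = {}
-- for _rank, _terms in enumerate([
--     ["frontend", "front-end", "front end", "ui", "ux", "web developer"],
--     ["backend", "back-end", "back end", "api", "server"],
--     ["devops", "sre", "reliability", "infrastructure"],
--     ["data", "analyst", "analytics", "bi", "intelligence"],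
--     ["ml", "ai", "machine learning", "data science", "scientist"],
--     ["mobile", "ios", "android", "app"],
--     ["full stack", "fullstack", "engineer", "developer"],
-- ]):
--     for _t in _terms:
--         _TERM_RANK[_t] = _rank
--
-- _TERM_LENGTHS = sorted({len(t) for t in _TERM_RANK})
--
-- # Result table indexed by rank; rank 7 = the no-match default.
-- _RESULTS = [
--     BASE_SKILL_TAXONOMY["Web Frameworks"],
--     BASE_SKILL_TAXONOMY["Programming Languages"],
--     BASE_SKILL_TAXONOMY["Cloud & DevOps"],
--     BASE_SKILL_TAXONOMY["Database Technologies"],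
--     BASE_SKILL_TAXONOMY["AI & Machine Learning"],
--     BASE_SKILL_TAXONOMY["Mobile Development"],
--     sorted(set(BASE_SKILL_TAXONOMY["Programming Languages"]
--                + BASE_SKILL_TAXONOMY["Web Frameworks"]
--                + BASE_SKILL_TAXONOMY["Database Technologies"])),
--     sorted({s for cat in BASE_SKILL_TAXONOMY.values() for s in cat[:3]}),
-- ]
--
--
-- def _get_industry_skills_for_role(role: str):
--     rl = role.lower()
--     best = 7
--     for start in range(len(rl)):
--         for length in _TERM_LENGTHS:
--             rank = _TERM_RANK.get(rl[start:start + length])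
--             if rank is not None and rank < best:
--                 best = rank
--     return _RESULTS[best]
-- ===== Notes on version B (the rewrite author's own statement) =====
-- stated objective: alternative
-- what changed: Inverts the traversal: instead of A's if-elif chain scanning the role for each keyword with `term in role_lower`, B builds a keyword-to-rank dict once, enumerates the substrings of the lowered role (each start position, each keyword length), looks each substring up in the dict and keeps the smallest rank, then indexes a precomputed result table (rank 7 = the no-match default).
import Mathlib
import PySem

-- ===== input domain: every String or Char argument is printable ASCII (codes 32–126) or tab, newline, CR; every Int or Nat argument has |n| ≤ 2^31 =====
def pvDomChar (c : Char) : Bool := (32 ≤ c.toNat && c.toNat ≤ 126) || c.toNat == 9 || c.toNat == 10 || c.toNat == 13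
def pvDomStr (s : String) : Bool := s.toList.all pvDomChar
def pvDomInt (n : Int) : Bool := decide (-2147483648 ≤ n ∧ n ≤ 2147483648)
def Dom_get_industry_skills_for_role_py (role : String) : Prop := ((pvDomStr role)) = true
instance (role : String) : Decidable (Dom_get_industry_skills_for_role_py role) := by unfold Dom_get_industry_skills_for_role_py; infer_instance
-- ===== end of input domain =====

set_option maxRecDepth 100000

-- B inverts the traversal: instead of scanning the role for each keyword (A's if-elif
-- `any(term in role_lower)` chain), it enumerates the substrings of the role and looks
-- each one up in a keyword→rank dict built once, keeping the smallest rank; objective: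
-- alternative (hash-index lookup over role substrings instead of per-keyword scans).


-- ===== PORT A =====
def pvTaxonomy : PySem.Dict String (List String) := PySem.Dict.ofList [
  ("Programming Languages", ["Python", "JavaScript", "Java", "C++", "C#", "Go", "Rust",
    "TypeScript", "PHP", "Ruby", "Swift", "Kotlin"]),
  ("Web Frameworks", ["React", "Angular", "Vue.js", "Django", "Flask", "Express",
    "Spring Boot", "Laravel", "ASP.NET", "Ruby on Rails", "Next.js"]),
  ("Cloud & DevOps", ["AWS", "Azure", "GCP", "Docker", "Kubernetes", "Terraform",
    "Jenkins", "GitHub Actions", "CircleCI", "Ansible", "Puppet"]),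
  ("Database Technologies", ["SQL", "MySQL", "PostgreSQL", "MongoDB", "Redis", "Elasticsearch",
    "Cassandra", "DynamoDB", "SQLite", "Oracle", "Neo4j"]),
  ("AI & Machine Learning", ["TensorFlow", "PyTorch", "scikit-learn", "NLP", "Computer Vision",
    "Machine Learning", "Deep Learning", "Data Science", "BERT", "Transformers"]),
  ("Mobile Development", ["iOS", "Android", "React Native", "Flutter", "Xamarin",
    "Swift", "Kotlin", "Objective-C", "Mobile UI"]),
  ("Tools & Methodologies", ["Git", "Agile", "Scrum", "JIRA", "CI/CD", "TDD",
    "Microservices", "REST API", "GraphQL", "DevOps"])]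

def get_industry_skills_for_role_py (role : String) : List String :=
  let role_lower := PySem.Str.lower role
  if ((["frontend", "front-end", "front end", "ui", "ux", "web developer"] : List String).any
      fun term => PySem.Str.isIn term role_lower) then
    pvTaxonomy.getD "Web Frameworks" []
  else if ((["backend", "back-end", "back end", "api", "server"] : List String).any
      fun term => PySem.Str.isIn term role_lower) then
    pvTaxonomy.getD "Programming Languages" []
  else if ((["devops", "sre", "reliability", "infrastructure"] : List String).any
      fun term => PySem.Str.isIn term role_lower) then
    pvTaxonomy.getD "Cloud & DevOps" []
  else if ((["data", "analyst", "analytics", "bi", "intelligence"] : List String).any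
      fun term => PySem.Str.isIn term role_lower) then
    pvTaxonomy.getD "Database Technologies" []
  else if ((["ml", "ai", "machine learning", "data science", "scientist"] : List String).any
      fun term => PySem.Str.isIn term role_lower) then
    pvTaxonomy.getD "AI & Machine Learning" []
  else if ((["mobile", "ios", "android", "app"] : List String).any
      fun term => PySem.Str.isIn term role_lower) then
    pvTaxonomy.getD "Mobile Development" []
  else if ((["full stack", "fullstack", "engineer", "developer"] : List String).any
      fun term => PySem.Str.isIn term role_lower) then
    let skills := (["Programming Languages", "Web Frameworks", "Database Technologies"] : List String).foldl
      (fun acc category => acc ++ pvTaxonomy.getD category []) []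
    PySem.List.sorted (PySem.Set.ofList skills) (fun x => x) false
  else
    let all_skills := pvTaxonomy.items.foldl
      (fun acc p => acc ++ PySem.List.slice p.2 none (some 3)) []
    PySem.List.sorted (PySem.Set.ofList all_skills) (fun x => x) false

-- ===== PORT B =====
-- the keyword → rank pairs the module-level loop of Source B inserts, in insertion order
def pvTermRank : List (String × Nat) := [
  ("frontend", 0), ("front-end", 0), ("front end", 0), ("ui", 0), ("ux", 0), ("web developer", 0),
  ("backend", 1), ("back-end", 1), ("back end", 1), ("api", 1), ("server", 1),
  ("devops", 2), ("sre", 2), ("reliability", 2), ("infrastructure", 2),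
  ("data", 3), ("analyst", 3), ("analytics", 3), ("bi", 3), ("intelligence", 3),
  ("ml", 4), ("ai", 4), ("machine learning", 4), ("data science", 4), ("scientist", 4),
  ("mobile", 5), ("ios", 5), ("android", 5), ("app", 5),
  ("full stack", 6), ("fullstack", 6), ("engineer", 6), ("developer", 6)]

def pvRankDict : PySem.Dict String Nat := PySem.Dict.ofList pvTermRank

-- _TERM_LENGTHS = sorted({len(t) for t in _TERM_RANK})
def pvTermLengths : List Int :=
  PySem.List.sorted (PySem.Set.ofList (pvTermRank.map (fun p => PySem.Str.len p.1))) (fun x => x) false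

def pvPL : List String := ["Python", "JavaScript", "Java", "C++", "C#", "Go", "Rust",
  "TypeScript", "PHP", "Ruby", "Swift", "Kotlin"]
def pvWF : List String := ["React", "Angular", "Vue.js", "Django", "Flask", "Express",
  "Spring Boot", "Laravel", "ASP.NET", "Ruby on Rails", "Next.js"]
def pvCD : List String := ["AWS", "Azure", "GCP", "Docker", "Kubernetes", "Terraform",
  "Jenkins", "GitHub Actions", "CircleCI", "Ansible", "Puppet"]
def pvDB : List String := ["SQL", "MySQL", "PostgreSQL", "MongoDB", "Redis", "Elasticsearch",
  "Cassandra", "DynamoDB", "SQLite", "Oracle", "Neo4j"]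
def pvAI : List String := ["TensorFlow", "PyTorch", "scikit-learn", "NLP", "Computer Vision",
  "Machine Learning", "Deep Learning", "Data Science", "BERT", "Transformers"]
def pvMob : List String := ["iOS", "Android", "React Native", "Flutter", "Xamarin",
  "Swift", "Kotlin", "Objective-C", "Mobile UI"]
def pvTools : List String := ["Git", "Agile", "Scrum", "JIRA", "CI/CD", "TDD",
  "Microservices", "REST API", "GraphQL", "DevOps"]

-- _RESULTS: result table indexed by rank; rank 7 = the no-match default
def pvResults : List (List String) := [
  pvWF, pvPL, pvCD, pvDB, pvAI, pvMob,
  PySem.List.sorted (PySem.Set.ofList (pvPL ++ pvWF ++ pvDB)) (fun x => x) false,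
  PySem.List.sorted (PySem.Set.ofList
    ([pvPL, pvWF, pvCD, pvDB, pvAI, pvMob, pvTools].foldl
      (fun acc cat => acc ++ PySem.List.slice cat none (some 3)) [])) (fun x => x) false]

-- the substring-enumeration loop: smallest matched rank, 7 if none
def pvBest (rl : String) : Nat :=
  (PySem.List.pyRange 0 (PySem.Str.len rl) 1).foldl (fun best start =>
    pvTermLengths.foldl (fun best length =>
      match pvRankDict.get? (PySem.Str.slice rl (some start) (some (start + length))) with
      | some rank => if rank < best then rank else best
      | none => best) best) 7

def get_industry_skills_for_role_py_alt (role : String) : List String :=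
  let rl := PySem.Str.lower role
  pvResults.getD (pvBest rl) []

-- ===== PRECONDITION & SPEC =====
def Spec_get_industry_skills_for_role_py (role : String) (out : List String) : Prop := out = get_industry_skills_for_role_py_alt role
instance (role : String) (out : List String) : Decidable (Spec_get_industry_skills_for_role_py role out) := by unfold Spec_get_industry_skills_for_role_py; infer_instance

-- ===== CLAIM (what is proved, stated in full; the proofs are below) =====
def Claim_equal_get_industry_skills_for_role_py : Prop := ∀ (role : String), Dom_get_industry_skills_for_role_py role → Spec_get_industry_skills_for_role_py role (get_industry_skills_for_role_py role)

-- ===== LEMMAS AND PROOFS =====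

-- the multiset of ranks the double loop of pvBest encounters
def pvCands (rl : String) : List Nat :=
  (PySem.List.pyRange 0 (PySem.Str.len rl) 1).flatMap (fun start =>
    pvTermLengths.filterMap (fun length =>
      pvRankDict.get? (PySem.Str.slice rl (some start) (some (start + length)))))

set_option maxRecDepth 40000 in
lemma pv_items : pvRankDict.items = pvTermRank := by decide

lemma pv_mem_rank {t : String} {p : Nat} (hget : pvRankDict.get? t = some p) :
    (t, p) ∈ pvTermRank := by
  have h := PySem.Dict.mem_items_of_get?_eq_some pvRankDict hget
  rwa [pv_items] at h

lemma pv_inner_filterMap (h : Int → Option Nat) (ls : List Int) (b : Nat) :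
    ls.foldl (fun b L => match h L with | some p => if p < b then p else b | none => b) b
      = (ls.filterMap h).foldl min b := by
  induction ls generalizing b with
  | nil => rfl
  | cons x xs ih =>
    simp only [List.foldl_cons, List.filterMap_cons]
    cases hx : h x with
    | none => exact ih b
    | some p =>
      simp only [List.foldl_cons]
      rw [ih]
      congr 1
      by_cases hpb : p < b
      · simp [hpb, Nat.min_def]
      · simp [hpb, Nat.min_def]

lemma pv_flat_foldl (g : Int → List Nat) (xs : List Int) (b : Nat) :
    xs.foldl (fun b s => (g s).foldl min b) b = (xs.flatMap g).foldl min b := by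
  induction xs generalizing b with
  | nil => rfl
  | cons x xs ih => simp only [List.foldl_cons, List.flatMap_cons, List.foldl_append, ih]

lemma pvBest_eq (rl : String) : pvBest rl = (pvCands rl).foldl min 7 := by
  unfold pvBest pvCands
  rw [← pv_flat_foldl]
  have hfun : (fun (best : Nat) (start : Int) =>
      pvTermLengths.foldl (fun best length =>
        match pvRankDict.get? (PySem.Str.slice rl (some start) (some (start + length))) with
        | some rank => if rank < best then rank else best
        | none => best) best)
      = (fun (b : Nat) (start : Int) =>
        (pvTermLengths.filterMap (fun length =>
          pvRankDict.get? (PySem.Str.slice rl (some start) (some (start + length))))).foldl min b) := by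
    funext b start
    exact pv_inner_filterMap _ _ b
  rw [hfun]

lemma pv_foldl_min_le_init (l : List Nat) (b : Nat) : l.foldl min b ≤ b := by
  induction l generalizing b with
  | nil => exact le_refl b
  | cons x xs ih => exact le_trans (ih _) (min_le_left _ _)

lemma pv_foldl_min_le_mem {l : List Nat} {b p : Nat} (h : p ∈ l) : l.foldl min b ≤ p := by
  induction l generalizing b with
  | nil => cases h
  | cons x xs ih =>
    simp only [List.foldl_cons]
    rcases List.mem_cons.mp h with rfl | h
    · exact le_trans (pv_foldl_min_le_init xs (min b p)) (min_le_right _ _)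
    · exact ih h

lemma pv_foldl_min_init_or_mem (l : List Nat) (b : Nat) : l.foldl min b = b ∨ l.foldl min b ∈ l := by
  induction l generalizing b with
  | nil => exact Or.inl rfl
  | cons x xs ih =>
    simp only [List.foldl_cons]
    rcases ih (min b x) with h | h
    · rcases min_choice b x with he | he
      · exact Or.inl (h.trans he)
      · refine Or.inr ?_
        rw [h, he]
        exact List.mem_cons_self
    · exact Or.inr (List.mem_cons_of_mem _ h)

-- a term with rank p that occurs in rl puts p among the candidates
lemma pv_cands_of_term (rl t : String) (p : Nat)
    (hget : pvRankDict.get? t = some p) (hin : PySem.Str.isIn t rl = true) :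
    p ∈ pvCands rl := by
  have hmem : (t, p) ∈ pvTermRank := pv_mem_rank hget
  have hne : t.toList ≠ [] := by
    have hall : ∀ q ∈ pvTermRank, q.1.toList ≠ [] := by decide
    exact hall _ hmem
  have hL : (t.toList.length : Int) ∈ pvTermLengths := by
    have hall : ∀ q ∈ pvTermRank, ((q.1.toList.length : Int)) ∈ pvTermLengths := by decide
    exact hall _ hmem
  have hinf : t.toList <:+: rl.toList := (PySem.Str.isIn_iff_infix t rl).mp hin
  obtain ⟨u, v, huv⟩ := hinf
  have hdrop : t.toList <+: rl.toList.drop u.length := by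
    rw [← huv]
    simp
  have hlen : u.length + t.toList.length ≤ rl.toList.length := by
    have h := congrArg List.length huv
    simp only [List.length_append] at h
    omega
  have hpos : 0 < t.toList.length := List.length_pos_iff.mpr hne
  have hslice : PySem.Str.slice rl (some (u.length : Int)) (some ((u.length : Int) + (t.toList.length : Int))) = t := by
    have h1 : (PySem.Str.slice rl (some (u.length : Int)) (some ((u.length : Int) + (t.toList.length : Int)))).toList
        = (rl.toList.drop u.length).take t.toList.length := by
      simp [PySem.Str.slice, PySem.List.slice_natCast_add]
    have h2 : (rl.toList.drop u.length).take t.toList.length = t.toList :=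
      (List.prefix_iff_eq_take.mp hdrop).symm
    have h3 := congrArg String.ofList (h1.trans h2)
    simpa using h3
  unfold pvCands
  rw [List.mem_flatMap]
  refine ⟨(u.length : Int), ?_, ?_⟩
  · rw [PySem.List.mem_pyRange_one]
    simp only [PySem.Str.len_eq]
    omega
  · rw [List.mem_filterMap]
    exact ⟨(t.toList.length : Int), hL, by rw [hslice, hget]⟩

-- every candidate is the rank of some term occurring in rl
lemma pv_term_of_cands (rl : String) (p : Nat) (hp : p ∈ pvCands rl) :
    ∃ t, pvRankDict.get? t = some p ∧ PySem.Str.isIn t rl = true := by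
  unfold pvCands at hp
  rw [List.mem_flatMap] at hp
  obtain ⟨start, hstart, hp⟩ := hp
  rw [List.mem_filterMap] at hp
  obtain ⟨length, hLmem, hget⟩ := hp
  refine ⟨_, hget, ?_⟩
  rw [PySem.Str.isIn_iff_infix]
  have h0 : (0:Int) ≤ start := (PySem.List.mem_pyRange_one.mp hstart).1
  have hs : (PySem.Str.slice rl (some start) (some (start + length))).toList
      = List.take ((start + length).toNat - start.toNat) (List.drop start.toNat rl.toList) := by
    simp [PySem.Str.slice]
    exact PySem.List.slice_toNat rl.toList h0 (by
      have hall : ∀ L ∈ pvTermLengths, (0:Int) ≤ L := by decide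
      have := hall _ hLmem
      omega)
  rw [hs]
  exact ((List.drop start.toNat rl.toList).take_prefix _).isInfix.trans
    (rl.toList.drop_suffix start.toNat).isInfix

-- the term lists of A's seven conditions, by rank
def pvTermsOf : Nat → List String
  | 0 => ["frontend", "front-end", "front end", "ui", "ux", "web developer"]
  | 1 => ["backend", "back-end", "back end", "api", "server"]
  | 2 => ["devops", "sre", "reliability", "infrastructure"]
  | 3 => ["data", "analyst", "analytics", "bi", "intelligence"]
  | 4 => ["ml", "ai", "machine learning", "data science", "scientist"]
  | 5 => ["mobile", "ios", "android", "app"]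
  | 6 => ["full stack", "fullstack", "engineer", "developer"]
  | _ => []

lemma pv_rank_lt (rl : String) (p : Nat) (hp : p ∈ pvCands rl) : p < 7 := by
  obtain ⟨t, hget, -⟩ := pv_term_of_cands rl p hp
  have hall : ∀ q ∈ pvTermRank, q.2 < 7 := by decide
  exact hall _ (pv_mem_rank hget)

set_option maxRecDepth 40000 in
lemma pv_get_of_terms : ∀ i ∈ List.range 7, ∀ t ∈ pvTermsOf i, pvRankDict.get? t = some i := by
  decide

lemma pv_match_iff (rl : String) (i : Nat) (hi : i < 7) :
    ((pvTermsOf i).any fun t => PySem.Str.isIn t rl) = true ↔ i ∈ pvCands rl := by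
  constructor
  · intro h
    rw [List.any_eq_true] at h
    obtain ⟨t, ht, hin⟩ := h
    exact pv_cands_of_term rl t i (pv_get_of_terms i (List.mem_range.mpr hi) t ht) hin
  · intro h
    obtain ⟨t, hget, hin⟩ := pv_term_of_cands rl i h
    rw [List.any_eq_true]
    refine ⟨t, ?_, hin⟩
    have hall : ∀ q ∈ pvTermRank, q.1 ∈ pvTermsOf q.2 := by decide
    exact hall _ (pv_mem_rank hget)

lemma pv_best_of_first (rl : String) (k : Nat)
    (hkm : k ∈ pvCands rl)
    (hlt : ∀ j, j < k → j ∉ pvCands rl) : pvBest rl = k := by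
  rw [pvBest_eq]
  have hle : (pvCands rl).foldl min 7 ≤ k := pv_foldl_min_le_mem hkm
  have hk7 : k < 7 := pv_rank_lt rl k hkm
  rcases pv_foldl_min_init_or_mem (pvCands rl) 7 with h | h
  · omega
  · by_contra hne
    exact hlt _ (by omega) h

lemma pv_best_of_none (rl : String) (hnone : ∀ j, j ∉ pvCands rl) : pvBest rl = 7 := by
  rw [pvBest_eq]
  rcases pv_foldl_min_init_or_mem (pvCands rl) 7 with h | h
  · exact h
  · exact absurd h (hnone _)

-- ===== VERDICT (by name: the statement is the Claim_ definition above) =====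
set_option maxRecDepth 40000 in
theorem get_industry_skills_for_role_py_spec : Claim_equal_get_industry_skills_for_role_py := by
  intro role _
  unfold Spec_get_industry_skills_for_role_py get_industry_skills_for_role_py
    get_industry_skills_for_role_py_alt
  dsimp only
  generalize PySem.Str.lower role = rl
  have M := pv_match_iff rl
  split_ifs with h0 h1 h2 h3 h4 h5 h6
  · rw [pv_best_of_first rl 0 ((M 0 (by omega)).mp h0) (by omega)]
    decide
  · rw [pv_best_of_first rl 1 ((M 1 (by omega)).mp h1) (by
      intro j hj hc
      have hcand := (M j (by omega)).mpr hc
      interval_cases j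
      · exact h0 hcand)]
    decide
  · rw [pv_best_of_first rl 2 ((M 2 (by omega)).mp h2) (by
      intro j hj hc
      have hcand := (M j (by omega)).mpr hc
      interval_cases j
      · exact h0 hcand
      · exact h1 hcand)]
    decide
  · rw [pv_best_of_first rl 3 ((M 3 (by omega)).mp h3) (by
      intro j hj hc
      have hcand := (M j (by omega)).mpr hc
      interval_cases j
      · exact h0 hcand
      · exact h1 hcand
      · exact h2 hcand)]
    decide
  · rw [pv_best_of_first rl 4 ((M 4 (by omega)).mp h4) (by
      intro j hj hc
      have hcand := (M j (by omega)).mpr hc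
      interval_cases j
      · exact h0 hcand
      · exact h1 hcand
      · exact h2 hcand
      · exact h3 hcand)]
    decide
  · rw [pv_best_of_first rl 5 ((M 5 (by omega)).mp h5) (by
      intro j hj hc
      have hcand := (M j (by omega)).mpr hc
      interval_cases j
      · exact h0 hcand
      · exact h1 hcand
      · exact h2 hcand
      · exact h3 hcand
      · exact h4 hcand)]
    decide
  · rw [pv_best_of_first rl 6 ((M 6 (by omega)).mp h6) (by
      intro j hj hc
      have hcand := (M j (by omega)).mpr hc
      interval_cases j
      · exact h0 hcand
      · exact h1 hcand
      · exact h2 hcand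
      · exact h3 hcand
      · exact h4 hcand
      · exact h5 hcand)]
    simp only [pvResults]
    simp [PySem.List.sorted]
    decide
  · rw [pv_best_of_none rl (by
      intro j hc
      have hj7 := pv_rank_lt rl j hc
      have hcand := (M j hj7).mpr hc
      interval_cases j
      · exact h0 hcand
      · exact h1 hcand
      · exact h2 hcand
      · exact h3 hcand
      · exact h4 hcand
      · exact h5 hcand
      · exact h6 hcand)]
    simp only [pvResults]
    simp [PySem.List.sorted]
    decide
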